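-- pv_equiv track=rewrite | github.com/Lemvein/Study | Сomputer mathematics/lab1/lab1.py | BordersDown
-- ===== SOURCE A (Python) =====
-- def Gorner(polinom,a):
--     b = [polinom[0]]
--     for i in range(len(polinom) - 1):
--         b.append(a * b[i] + polinom[i + 1])
--     return b
--
-- def BordersDown(polinom):
--     polinom = [i * (-1) ** (len(polinom) - 1) for i in polinom]
--     for i in range(len(polinom)):
--         polinom[i] = polinom[i] * (-1) ** (len(polinom) - i - 1)
--     for i in range(1000000):
--         b = Gorner(polinom, i)
--         f = True
--         for j in b:
--             if j < 0:
--                 f = False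
--                 break
--         if f == True:
--             break
--     return -1*i
-- ===== SOURCE B (Python) =====
-- def BordersDown(polinom):
--     # alternating-sign transform in one pass, then binary search for the first
--     # nonnegative integer a where all Horner coefficients are >= 0;
--     # M-cutoff keeps the Horner values small: once a >= 2 and b >= M,
--     # every later value stays >= b, so the answer is already True.
--     c = [x if k % 2 == 0 else -x for k, x in enumerate(polinom)]
--     M = 0
--     for x in c:
--         M = max(M, -x)
--
--     def ok(a):
--         b = c[0]
--         if b < 0:
--             return False
--         for x in c[1:]:
--             if a >= 2 and b >= M:
--                 return True
--             b = a * b + x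
--             if b < 0:
--                 return False
--         return True
--
--     lo, hi = 0, 999999
--     while lo < hi:
--         mid = (lo + hi) // 2
--         if ok(mid):
--             hi = mid
--         else:
--             lo = mid + 1
--     return -lo
-- ===== Notes on version B (the rewrite author's own statement) =====
-- stated objective: faster
-- what changed: Replaced the linear scan of a = 0..999999 (each testing all Horner coefficients) by a binary search on the monotone predicate 'all Horner coefficients nonnegative', and fused A's two sign-flip passes into one alternating-sign pass.
import Mathlib
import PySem

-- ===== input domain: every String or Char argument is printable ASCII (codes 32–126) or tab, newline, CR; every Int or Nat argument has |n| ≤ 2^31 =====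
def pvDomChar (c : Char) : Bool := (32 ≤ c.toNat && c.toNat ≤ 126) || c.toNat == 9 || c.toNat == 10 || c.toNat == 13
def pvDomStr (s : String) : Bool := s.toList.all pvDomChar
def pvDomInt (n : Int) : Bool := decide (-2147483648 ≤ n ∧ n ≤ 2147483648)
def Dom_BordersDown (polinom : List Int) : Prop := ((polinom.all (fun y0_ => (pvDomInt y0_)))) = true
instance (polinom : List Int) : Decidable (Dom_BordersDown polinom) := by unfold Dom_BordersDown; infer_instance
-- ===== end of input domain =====

-- B replaces A's linear scan over a = 0..999999 by a binary search on the monotone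
-- predicate "all Horner coefficients nonnegative" (with an early-True cutoff once the
-- running value can no longer turn negative), fusing A's two sign-flip passes into one.

-- ===== PORT A =====
-- (-1) ** n
def neg1pow (n : Nat) : Int := (-1) ^ n

-- b.append(a * b[i] + polinom[i + 1]) loop of Gorner
def GornerGo (a prev : Int) : List Int → List Int
  | [] => []
  | c :: cs => (a * prev + c) :: GornerGo a (a * prev + c) cs

-- Gorner(polinom, a); polinom[0] raises IndexError on [], excluded by Pre_
def Gorner (p : List Int) (a : Int) : List Int :=
  match p with
  | [] => []
  | c :: cs => c :: GornerGo a c cs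

-- f = True; for j in b: if j < 0: f = False; break
def checkAll : List Int → Bool
  | [] => true
  | j :: t => if j < 0 then false else checkAll t

-- for i in range(1000000): … if f == True: break; return -1*i
-- (at i = 999999 the loop ends with i = 999999 whether or not it breaks)
def goA (p : List Int) (i : Nat) : Int :=
  if i < 999999 then
    (if checkAll (Gorner p (i : Int)) then -(i : Int) else goA p (i + 1))
  else -999999
termination_by 999999 - i

def BordersDown (polinom : List Int) : Int :=
  let p1 := polinom.map (fun x => x * neg1pow (polinom.length - 1))
  let p2 := p1.mapIdx (fun i x => x * neg1pow (p1.length - i - 1))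
  goA p2 0

-- ===== PORT B =====
-- c = [x if k % 2 == 0 else -x for k, x in enumerate(polinom)]
def altSigns (p : List Int) : List Int :=
  p.zipIdx.map (fun xk => if xk.2 % 2 = 0 then xk.1 else -xk.1)

-- the for-loop body of ok, with the early-True cutoff and the early-False return
def okGo (M a b : Int) : List Int → Bool
  | [] => true
  | x :: t =>
    if 2 ≤ a ∧ M ≤ b then true
    else if a * b + x < 0 then false else okGo M a (a * b + x) t

-- ok(a); c[0] raises IndexError on [], excluded by Pre_
def okB (M : Int) (c : List Int) (a : Int) : Bool :=
  match c with
  | [] => true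
  | c0 :: cs => if c0 < 0 then false else okGo M a c0 cs

-- while lo < hi: mid = (lo + hi) // 2; …
def bs (M : Int) (c : List Int) (lo hi : Int) : Int :=
  if h : lo < hi then
    let mid := PySem.Int.floordiv (lo + hi) 2
    if okB M c mid then bs M c lo mid else bs M c (mid + 1) hi
  else lo
termination_by (hi - lo).toNat
decreasing_by
  · have h1 := (PySem.Int.floordiv_lt_iff_lt_mul (a := lo + hi) (b := 2) (q := hi) (by omega)).mpr (by omega)
    omega
  · have h2 := (PySem.Int.le_floordiv_iff_mul_le (a := lo + hi) (b := 2) (q := lo) (by omega)).mpr (by omega)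
    omega

def BordersDown_alt (polinom : List Int) : Int :=
  let c := altSigns polinom
  let M := c.foldl (fun m x => max m (-x)) 0
  (-(bs M c 0 999999))

-- ===== PRECONDITION & SPEC =====
-- Pre_ excludes only the empty list, on which the Python A raises IndexError (polinom[0] in Gorner).
def Pre_BordersDown (polinom : List Int) : Prop := polinom ≠ []
instance (polinom : List Int) : Decidable (Pre_BordersDown polinom) := by unfold Pre_BordersDown; infer_instance
def pvWitness_BordersDown : List Int := ([1, 2, 3])

def Spec_BordersDown (polinom : List Int) (out : Int) : Prop := out = BordersDown_alt polinom
instance (polinom : List Int) (out : Int) : Decidable (Spec_BordersDown polinom out) := by unfold Spec_BordersDown; infer_instance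

-- ===== CLAIM =====
def Claim_equal_BordersDown : Prop := ∀ (polinom : List Int), Dom_BordersDown polinom → Pre_BordersDown polinom → Spec_BordersDown polinom (BordersDown polinom)

-- ===== LEMMAS AND PROOFS =====

theorem neg1pow_mod (n : Nat) : neg1pow n = if n % 2 = 0 then 1 else -1 := by
  induction n with
  | zero => simp [neg1pow]
  | succ k ih =>
    unfold neg1pow at *
    rw [pow_succ, ih]
    rcases Nat.even_or_odd k with ⟨m, hm⟩ | ⟨m, hm⟩ <;> subst hm <;>
      simp <;> omega

theorem neg1pow_add (a b : Nat) : neg1pow a * neg1pow b = neg1pow (a + b) := by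
  simp [neg1pow, pow_add]

-- A's two sign passes equal B's alternating-sign pass
theorem transform_eq (p : List Int) :
    (p.map (fun x => x * neg1pow (p.length - 1))).mapIdx
      (fun i x => x * neg1pow ((p.map (fun x => x * neg1pow (p.length - 1))).length - i - 1))
    = altSigns p := by
  apply List.ext_getElem
  · simp [altSigns]
  · intro i h1 h2
    have hlen : i < p.length := by simpa [altSigns] using h2
    simp only [List.getElem_mapIdx, List.getElem_map, List.length_map, altSigns,
      List.getElem_zipIdx, Nat.zero_add]
    have hpar : (p.length - 1 + (p.length - i - 1)) % 2 = i % 2 := by omega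
    have key : ∀ x : Int, x * neg1pow (p.length - 1) * neg1pow (p.length - i - 1)
        = if i % 2 = 0 then x else -x := by
      intro x
      rw [mul_assoc, neg1pow_add, neg1pow_mod, hpar]
      split <;> ring
    exact key _

-- once 2 ≤ a and M ≤ b, every later Horner value stays ≥ b, so the check succeeds
theorem gorner_cap (M a : Int) (cs : List Int) : ∀ (b : Int), 2 ≤ a → 0 ≤ M → M ≤ b →
    (∀ x ∈ cs, -x ≤ M) → checkAll (GornerGo a b cs) = true := by
  induction cs with
  | nil => intros; rfl
  | cons x t ih =>
    intro b ha hM0 hMb hbd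
    have hx : -x ≤ M := hbd x (by simp)
    have h2b : 2 * b ≤ a * b := mul_le_mul_of_nonneg_right ha (by omega)
    have hnext : b ≤ a * b + x := by omega
    simp only [GornerGo, checkAll]
    rw [if_neg (by omega)]
    exact ih (a * b + x) ha hM0 (by omega) (fun y hy => hbd y (by simp [hy]))

-- the ok loop of B computes "all Horner coefficients nonnegative"
theorem okGo_eq_check (M a : Int) (cs : List Int) : ∀ (prev : Int), 0 ≤ M →
    (∀ x ∈ cs, -x ≤ M) → okGo M a prev cs = checkAll (GornerGo a prev cs) := by
  induction cs with
  | nil => intros; rfl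
  | cons x t ih =>
    intro prev hM0 hbd
    simp only [okGo, GornerGo, checkAll]
    by_cases hcap : 2 ≤ a ∧ M ≤ prev
    · rw [if_pos hcap]
      have := gorner_cap M a (x :: t) prev hcap.1 hM0 hcap.2 hbd
      simp only [GornerGo, checkAll] at this
      exact this.symm
    · rw [if_neg hcap]
      by_cases hneg : a * prev + x < 0
      · simp [hneg]
      · simp only [hneg, if_false]
        exact ih (a * prev + x) hM0 (fun y hy => hbd y (by simp [hy]))

theorem okB_eq_check (M : Int) (c : List Int) (a : Int) (hM0 : 0 ≤ M)
    (hbd : ∀ x ∈ c, -x ≤ M) : okB M c a = checkAll (Gorner c a) := by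
  cases c with
  | nil => rfl
  | cons c0 cs =>
    simp only [okB, Gorner, checkAll]
    by_cases h0 : c0 < 0
    · simp [h0]
    · simp only [h0, if_false]
      exact okGo_eq_check M a cs c0 hM0 (fun y hy => hbd y (by simp [hy]))

-- monotonicity of the Horner-positivity predicate in the evaluation point
theorem checkGo_mono (cs : List Int) : ∀ (a a' prev prev' : Int), 0 ≤ a → a ≤ a' →
    0 ≤ prev → prev ≤ prev' → checkAll (GornerGo a prev cs) = true →
    checkAll (GornerGo a' prev' cs) = true := by
  induction cs with
  | nil => intros; rfl
  | cons x t ih =>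
    intro a a' prev prev' ha haa hp hpp hok
    simp only [GornerGo, checkAll] at hok ⊢
    have hmul : a * prev ≤ a' * prev' := by
      calc a * prev ≤ a' * prev := by apply mul_le_mul_of_nonneg_right haa hp
        _ ≤ a' * prev' := by apply mul_le_mul_of_nonneg_left hpp (by omega)
    by_cases hneg : a * prev + x < 0
    · simp [hneg] at hok
    · simp only [hneg, if_false] at hok
      have hneg' : ¬ a' * prev' + x < 0 := by omega
      simp only [hneg', if_false]
      exact ih a a' _ _ ha haa (by omega) (by omega) hok

theorem check_mono (c : List Int) (a a' : Int) (ha : 0 ≤ a) (haa : a ≤ a')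
    (hok : checkAll (Gorner c a) = true) : checkAll (Gorner c a') = true := by
  cases c with
  | nil => rfl
  | cons c0 cs =>
    simp only [Gorner, checkAll] at hok ⊢
    by_cases h0 : c0 < 0
    · simp [h0] at hok
    · simp only [h0, if_false] at hok ⊢
      exact checkGo_mono cs a a' c0 c0 ha haa (by omega) (by omega) hok

-- A's scan skips over indices where the check fails
theorem goA_skip (c : List Int) : ∀ (d i j : Nat), j - i ≤ d → i ≤ j → j ≤ 999999 →
    (∀ t : Nat, i ≤ t → t < j → checkAll (Gorner c (t : Int)) = false) →
    goA c i = goA c j := by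
  intro d
  induction d with
  | zero =>
    intro i j h1 h2 _ _
    obtain rfl : i = j := by omega
    rfl
  | succ d ih =>
    intro i j h1 h2 h3 hfail
    by_cases hij : i = j
    · rw [hij]
    · have hilt : i < j := by omega
      rw [goA]
      have : i < 999999 := by omega
      rw [if_pos this, hfail i (by omega) hilt, if_neg (by simp)]
      exact ih (i + 1) j (by omega) (by omega) h3 (fun t ht1 ht2 => hfail t (by omega) ht2)

-- binary search on the monotone predicate returns the index A's linear scan finds
theorem bridge (M : Int) (c : List Int) (hM0 : 0 ≤ M) (hbd : ∀ x ∈ c, -x ≤ M) :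
    ∀ (n : Nat) (i : Nat) (hi : Int), (hi - (i : Int)).toNat ≤ n →
    i ≤ 999999 → (i : Int) ≤ hi → hi ≤ 999999 →
    (checkAll (Gorner c hi) = true ∨ hi = 999999) →
    bs M c (i : Int) hi = -(goA c i) := by
  intro n
  induction n with
  | zero =>
    intro i hi hn h1 h2 h3 h4
    have hieq : (i : Int) = hi := by omega
    rw [bs, dif_neg (by omega)]
    rw [goA]
    by_cases hlt : i < 999999
    · rw [if_pos hlt]
      have hok : checkAll (Gorner c (i : Int)) = true := by
        rcases h4 with h | h
        · rwa [hieq]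
        · exfalso; rw [h] at hieq; omega
      rw [hok, if_pos rfl]; ring
    · rw [if_neg hlt]
      have : i = 999999 := by omega
      rw [this] at hieq ⊢
      omega
  | succ n ih =>
    intro i hi hn h1 h2 h3 h4
    by_cases hlt : (i : Int) < hi
    · rw [bs, dif_pos hlt]
      have hmid1 := (PySem.Int.le_floordiv_iff_mul_le (a := (i : Int) + hi) (b := 2) (q := (i : Int)) (by omega)).mpr (by omega)
      have hmid2 := (PySem.Int.floordiv_lt_iff_lt_mul (a := (i : Int) + hi) (b := 2) (q := hi) (by omega)).mpr (by omega)
      set mid := PySem.Int.floordiv ((i : Int) + hi) 2 with hmiddef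
      show (if okB M c mid = true then bs M c ((i : Int)) mid else bs M c (mid + 1) hi) = -(goA c i)
      rw [okB_eq_check M c mid hM0 hbd]
      by_cases hok : checkAll (Gorner c mid) = true
      · rw [if_pos hok]
        exact ih i mid (by omega) h1 hmid1 (by omega) (Or.inl hok)
      · rw [if_neg hok]
        have hmidnn : 0 ≤ mid := by omega
        have hcast : mid + 1 = ((mid.toNat + 1 : Nat) : Int) := by omega
        rw [hcast]
        have hres := ih (mid.toNat + 1) hi (by omega) (by omega) (by omega) h3 h4
        rw [hres]
        congr 1
        refine (goA_skip c (mid.toNat + 1 - i) i (mid.toNat + 1) (by omega) (by omega) (by omega) ?_).symm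
        intro t ht1 ht2
        by_cases hokt : checkAll (Gorner c (t : Int)) = true
        · exfalso
          exact hok (check_mono c (t : Int) mid (by omega) (by omega) hokt)
        · simpa using hokt
    · exact ih i hi (by omega) h1 h2 h3 h4

-- ===== VERDICT =====
theorem BordersDown_spec : Claim_equal_BordersDown := by
  intro polinom _ _
  have hmax := PySem.List.le_foldl_max ((altSigns polinom).map (fun x => -x)) 0
  rw [List.foldl_map] at hmax
  have h := bridge ((altSigns polinom).foldl (fun m x => max m (-x)) 0) (altSigns polinom)
    hmax.1 (fun x hx => hmax.2 (-x) (List.mem_map_of_mem hx))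
    999999 0 999999 (by omega) (by omega) (by omega) (by omega) (Or.inr rfl)
  simp only [Nat.cast_zero] at h
  unfold Spec_BordersDown
  simp only [BordersDown, BordersDown_alt]
  rw [transform_eq, h, neg_neg]
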